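-- pv_equiv track=rewrite | github.com/b02thomas/RIX-Personal-Agent | 03-implementation/backend-improvements/enhanced-mock-responses.py | _detect_voice_intent
-- ===== SOURCE A (Python) =====
-- def _detect_voice_intent(transcription: str) -> str:
--     """Detect intent from voice transcription"""
--     text_lower = transcription.lower()
--
--     if any(word in text_lower for word in ["create", "add", "new"]):
--         if "task" in text_lower:
--             return "create_task"
--         elif "meeting" in text_lower or "schedule" in text_lower:
--             return "schedule_meeting"
--         elif "routine" in text_lower:
--             return "add_routine"
--     elif any(word in text_lower for word in ["show", "display", "what"]):
--         if "project" in text_lower: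
--             return "show_projects"
--         elif "task" in text_lower:
--             return "show_tasks"
--         elif "calendar" in text_lower:
--             return "show_calendar"
--     elif any(word in text_lower for word in ["open", "go to", "navigate"]):
--         return "navigate"
--     elif "briefing" in text_lower:
--         return "generate_briefing"
--
--     return "general_query"
-- ===== SOURCE B (Python) =====
-- _KEYWORDS = ("create", "add", "new", "task", "meeting", "schedule", "routine",
--              "show", "display", "what", "project", "calendar", "open", "go to",
--              "navigate", "briefing")
--
-- _CREATE = frozenset(("create", "add", "new"))
-- _SHOW = frozenset(("show", "display", "what"))
-- _NAV = frozenset(("open", "go to", "navigate"))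
-- _BRIEF = frozenset(("briefing",))
--
-- # Flat priority list: (trigger set, required keyword or None, intent).
-- # Each group's final (triggers, None, "general_query") row realises the
-- # elif fall-through: a triggered group absorbs the input.
-- _CANDIDATES = (
--     (_CREATE, "task", "create_task"),
--     (_CREATE, "meeting", "schedule_meeting"),
--     (_CREATE, "schedule", "schedule_meeting"),
--     (_CREATE, "routine", "add_routine"),
--     (_CREATE, None, "general_query"),
--     (_SHOW, "project", "show_projects"),
--     (_SHOW, "task", "show_tasks"),
--     (_SHOW, "calendar", "show_calendar"),
--     (_SHOW, None, "general_query"),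
--     (_NAV, None, "navigate"),
--     (_BRIEF, None, "generate_briefing"),
-- )
--
--
-- def _detect_voice_intent(transcription: str) -> str:
--     """Detect intent: extract the set of present keywords once, then pick the
--     first satisfied candidate from a flat priority list by set logic."""
--     text = transcription.lower()
--     present = {w for w in _KEYWORDS if w in text}
--     return next((intent for triggers, kw, intent in _CANDIDATES
--                  if triggers & present and (kw is None or kw in present)),
--                 "general_query")
-- ===== Notes on version B (the rewrite author's own statement) =====
-- stated objective: idiomatic
-- what changed: Instead of a nested if/elif substring cascade, B first extracts the set of present keywords in one pass, then selects the intent from a flat priority list of (trigger-set, keyword, intent) candidates by set intersection/membership, with explicit general_query rows encoding the elif fall-through.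
import Mathlib
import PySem

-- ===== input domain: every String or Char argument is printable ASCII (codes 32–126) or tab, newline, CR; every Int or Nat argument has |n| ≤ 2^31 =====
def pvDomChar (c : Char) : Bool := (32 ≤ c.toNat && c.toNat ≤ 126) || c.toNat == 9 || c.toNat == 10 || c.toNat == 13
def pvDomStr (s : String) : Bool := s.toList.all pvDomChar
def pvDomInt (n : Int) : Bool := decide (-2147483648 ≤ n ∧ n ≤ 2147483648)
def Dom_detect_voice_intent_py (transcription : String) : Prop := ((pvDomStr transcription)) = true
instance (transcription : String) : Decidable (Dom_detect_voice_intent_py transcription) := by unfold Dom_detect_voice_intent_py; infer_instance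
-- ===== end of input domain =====

-- B replaces A's nested if/elif substring cascade by one keyword-presence feature-set pass plus
-- a flat priority list of (trigger-set, keyword, intent) candidates chosen by set logic (idiomatic; same cost).

-- ===== PORT A =====
def detect_voice_intent_py (transcription : String) : String :=
  let text_lower := PySem.Str.lower transcription
  if ["create", "add", "new"].any (fun w => PySem.Str.isIn w text_lower) then
    if PySem.Str.isIn "task" text_lower then "create_task"
    else if PySem.Str.isIn "meeting" text_lower || PySem.Str.isIn "schedule" text_lower then "schedule_meeting"
    else if PySem.Str.isIn "routine" text_lower then "add_routine"
    else "general_query"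
  else if ["show", "display", "what"].any (fun w => PySem.Str.isIn w text_lower) then
    if PySem.Str.isIn "project" text_lower then "show_projects"
    else if PySem.Str.isIn "task" text_lower then "show_tasks"
    else if PySem.Str.isIn "calendar" text_lower then "show_calendar"
    else "general_query"
  else if ["open", "go to", "navigate"].any (fun w => PySem.Str.isIn w text_lower) then
    "navigate"
  else if PySem.Str.isIn "briefing" text_lower then
    "generate_briefing"
  else "general_query"

-- ===== PORT B =====
def pvKeywords : List String :=
  ["create", "add", "new", "task", "meeting", "schedule", "routine",
   "show", "display", "what", "project", "calendar", "open", "go to",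
   "navigate", "briefing"]

-- the set comprehension {w for w in _KEYWORDS if w in text}
def pvPresent (text : String) : PySem.Set String :=
  PySem.Set.ofList (pvKeywords.filter (fun w => PySem.Str.isIn w text))

def pvCreate : PySem.Set String := PySem.Set.ofList ["create", "add", "new"]
def pvShow : PySem.Set String := PySem.Set.ofList ["show", "display", "what"]
def pvNav : PySem.Set String := PySem.Set.ofList ["open", "go to", "navigate"]
def pvBrief : PySem.Set String := PySem.Set.ofList ["briefing"]

def pvCandidates : List (PySem.Set String × Option String × String) :=
  [ (pvCreate, some "task", "create_task"),
    (pvCreate, some "meeting", "schedule_meeting"),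
    (pvCreate, some "schedule", "schedule_meeting"),
    (pvCreate, some "routine", "add_routine"),
    (pvCreate, none, "general_query"),
    (pvShow, some "project", "show_projects"),
    (pvShow, some "task", "show_tasks"),
    (pvShow, some "calendar", "show_calendar"),
    (pvShow, none, "general_query"),
    (pvNav, none, "navigate"),
    (pvBrief, none, "generate_briefing") ]

-- the next(...) over the candidate generator: first satisfied candidate, default "general_query"
def pvPick (present : PySem.Set String) : List (PySem.Set String × Option String × String) → String
  | [] => "general_query"
  | (triggers, kw, intent) :: rest =>
    if !(PySem.Set.inter triggers present).isEmpty
        && (match kw with | none => true | some k => PySem.Set.contains present k) then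
      intent
    else pvPick present rest

def detect_voice_intent_py_alt (transcription : String) : String :=
  let text := PySem.Str.lower transcription
  pvPick (pvPresent text) pvCandidates

-- ===== PRECONDITION & SPEC =====
def Spec_detect_voice_intent_py (transcription : String) (out : String) : Prop := out = detect_voice_intent_py_alt transcription
instance (transcription : String) (out : String) : Decidable (Spec_detect_voice_intent_py transcription out) := by unfold Spec_detect_voice_intent_py; infer_instance

-- ===== CLAIM =====
def Claim_equal_detect_voice_intent_py : Prop := ∀ (transcription : String), Dom_detect_voice_intent_py transcription → Spec_detect_voice_intent_py transcription (detect_voice_intent_py transcription)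

-- ===== LEMMAS AND PROOFS =====
theorem pvCreate_eq : pvCreate = ["create", "add", "new"] := by decide
theorem pvShow_eq : pvShow = ["show", "display", "what"] := by decide
theorem pvNav_eq : pvNav = ["open", "go to", "navigate"] := by decide
theorem pvBrief_eq : pvBrief = ["briefing"] := by decide

theorem pv_bang_isEmpty_filter {α : Type} (p : α → Bool) (s : List α) :
    (!(s.filter p).isEmpty) = s.any p := by
  induction s with
  | nil => rfl
  | cons a s ih => cases h : p a <;> simp [List.any_cons, h, ih]

theorem pv_contains_present (t k : String) (hk : k ∈ pvKeywords) :
    PySem.Set.contains (pvPresent t) k = PySem.Str.isIn k t := by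
  cases h : PySem.Str.isIn k t with
  | true =>
    exact (PySem.Set.contains_iff _ _).mpr
      ((PySem.Set.mem_ofList _ _).mpr (List.mem_filter.mpr ⟨hk, h⟩))
  | false =>
    cases hc : PySem.Set.contains (pvPresent t) k with
    | false => rfl
    | true =>
      exfalso
      have hm := (PySem.Set.mem_ofList _ _).mp ((PySem.Set.contains_iff _ _).mp hc)
      have h2 := (List.mem_filter.mp hm).2
      rw [h] at h2
      exact Bool.false_ne_true h2

theorem pvc_create (t : String) : PySem.Set.contains (pvPresent t) "create" = PySem.Str.isIn "create" t :=
  pv_contains_present t "create" (by decide)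
theorem pvc_add (t : String) : PySem.Set.contains (pvPresent t) "add" = PySem.Str.isIn "add" t :=
  pv_contains_present t "add" (by decide)
theorem pvc_new (t : String) : PySem.Set.contains (pvPresent t) "new" = PySem.Str.isIn "new" t :=
  pv_contains_present t "new" (by decide)
theorem pvc_task (t : String) : PySem.Set.contains (pvPresent t) "task" = PySem.Str.isIn "task" t :=
  pv_contains_present t "task" (by decide)
theorem pvc_meeting (t : String) : PySem.Set.contains (pvPresent t) "meeting" = PySem.Str.isIn "meeting" t :=
  pv_contains_present t "meeting" (by decide)
theorem pvc_schedule (t : String) : PySem.Set.contains (pvPresent t) "schedule" = PySem.Str.isIn "schedule" t :=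
  pv_contains_present t "schedule" (by decide)
theorem pvc_routine (t : String) : PySem.Set.contains (pvPresent t) "routine" = PySem.Str.isIn "routine" t :=
  pv_contains_present t "routine" (by decide)
theorem pvc_show (t : String) : PySem.Set.contains (pvPresent t) "show" = PySem.Str.isIn "show" t :=
  pv_contains_present t "show" (by decide)
theorem pvc_display (t : String) : PySem.Set.contains (pvPresent t) "display" = PySem.Str.isIn "display" t :=
  pv_contains_present t "display" (by decide)
theorem pvc_what (t : String) : PySem.Set.contains (pvPresent t) "what" = PySem.Str.isIn "what" t :=
  pv_contains_present t "what" (by decide)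
theorem pvc_project (t : String) : PySem.Set.contains (pvPresent t) "project" = PySem.Str.isIn "project" t :=
  pv_contains_present t "project" (by decide)
theorem pvc_calendar (t : String) : PySem.Set.contains (pvPresent t) "calendar" = PySem.Str.isIn "calendar" t :=
  pv_contains_present t "calendar" (by decide)
theorem pvc_open (t : String) : PySem.Set.contains (pvPresent t) "open" = PySem.Str.isIn "open" t :=
  pv_contains_present t "open" (by decide)
theorem pvc_goto (t : String) : PySem.Set.contains (pvPresent t) "go to" = PySem.Str.isIn "go to" t :=
  pv_contains_present t "go to" (by decide)
theorem pvc_navigate (t : String) : PySem.Set.contains (pvPresent t) "navigate" = PySem.Str.isIn "navigate" t :=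
  pv_contains_present t "navigate" (by decide)
theorem pvc_briefing (t : String) : PySem.Set.contains (pvPresent t) "briefing" = PySem.Str.isIn "briefing" t :=
  pv_contains_present t "briefing" (by decide)

-- ===== VERDICT =====
theorem detect_voice_intent_py_spec : Claim_equal_detect_voice_intent_py := by
  intro transcription _
  unfold Spec_detect_voice_intent_py detect_voice_intent_py detect_voice_intent_py_alt
  simp only [pvPick, pvCandidates, PySem.Set.inter,
    pvCreate_eq, pvShow_eq, pvNav_eq, pvBrief_eq, pv_bang_isEmpty_filter,
    List.any_cons, List.any_nil, Bool.or_false,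
    pvc_create, pvc_add, pvc_new, pvc_task, pvc_meeting, pvc_schedule, pvc_routine,
    pvc_show, pvc_display, pvc_what, pvc_project, pvc_calendar, pvc_open, pvc_goto,
    pvc_navigate, pvc_briefing]
  generalize PySem.Str.isIn "task" (PySem.Str.lower transcription) = b4
  generalize PySem.Str.isIn "meeting" (PySem.Str.lower transcription) = b5
  generalize PySem.Str.isIn "schedule" (PySem.Str.lower transcription) = b6
  generalize PySem.Str.isIn "routine" (PySem.Str.lower transcription) = b7
  generalize PySem.Str.isIn "project" (PySem.Str.lower transcription) = b11
  generalize PySem.Str.isIn "calendar" (PySem.Str.lower transcription) = b12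
  generalize PySem.Str.isIn "briefing" (PySem.Str.lower transcription) = b16
  generalize (PySem.Str.isIn "create" (PySem.Str.lower transcription) ||
      (PySem.Str.isIn "add" (PySem.Str.lower transcription) ||
       PySem.Str.isIn "new" (PySem.Str.lower transcription))) = g1
  generalize (PySem.Str.isIn "show" (PySem.Str.lower transcription) ||
      (PySem.Str.isIn "display" (PySem.Str.lower transcription) ||
       PySem.Str.isIn "what" (PySem.Str.lower transcription))) = g2
  generalize (PySem.Str.isIn "open" (PySem.Str.lower transcription) ||
      (PySem.Str.isIn "go to" (PySem.Str.lower transcription) ||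
       PySem.Str.isIn "navigate" (PySem.Str.lower transcription))) = g3
  revert g1 g2 g3 b4 b5 b6 b7 b11 b12 b16
  decide
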